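-- pv_equiv track=rewrite | github.com/marco-feitosa/serialgen | database_gen.py | restricted_compositions
-- ===== SOURCE A (Python) =====
-- def restricted_compositions(s, k, n):
--     allowed = range(1, n)
--
--     def restrict(r, part, composition):
--         if len(composition) == 0:
--             return []
--         else:
--             return [(summation + part) % n for summation in r] + [(composition[-1] + part) % n]
--
--     def compute(s, k, composition = (), r = []):
--         if k == 0:
--             if s == 0:
--                 yield composition
--
--         elif not 0 in r:
--             if k == 1:
--                 if s in allowed:
--                     yield composition + (s,)
--
--             elif k <= s <= (n-1)*k:
--                 for part in allowed:
--                     yield from compute(s - part, k - 1, composition + (part,), restrict(r, part, composition))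
--
--     return compute(s, k)
-- ===== SOURCE B (Python) =====
-- def restricted_compositions(s, k, n):
--     # Iterative DFS with an explicit stack of frames; each frame carries the
--     # running prefix sum mod n and the set of prefix sums already seen, instead
--     # of A's per-call rebuilt suffix-sum list.
--     allowed = range(1, n)
--     out = []
--     stack = [(s, k, (), 0, frozenset((0,)))]
--     while stack:
--         rem, parts, comp, cur, seen = stack.pop()
--         if parts == 0:
--             if rem == 0:
--                 out.append(comp)
--         elif parts == 1:
--             if rem in allowed:
--                 out.append(comp + (rem,))
--         elif parts <= rem <= (n - 1) * parts:
--             for part in reversed(allowed):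
--                 np = (cur + part) % n
--                 if np not in seen:
--                     stack.append((rem - part, parts - 1, comp + (part,), np, seen | {np}))
--     return out
-- ===== Notes on version B (the rewrite author's own statement) =====
-- stated objective: alternative
-- what changed: Replaces A's recursive generator that rebuilds a suffix-sum list r (mapping (+part)%n over the whole list at every call, then testing 0 in r) with an iterative DFS over an explicit stack of frames, each frame carrying the running prefix sum mod n and the set of prefix sums already seen, pruning a branch at push time when the new prefix sum repeats; children are pushed in reversed order so the output order is identical.
import Mathlib
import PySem

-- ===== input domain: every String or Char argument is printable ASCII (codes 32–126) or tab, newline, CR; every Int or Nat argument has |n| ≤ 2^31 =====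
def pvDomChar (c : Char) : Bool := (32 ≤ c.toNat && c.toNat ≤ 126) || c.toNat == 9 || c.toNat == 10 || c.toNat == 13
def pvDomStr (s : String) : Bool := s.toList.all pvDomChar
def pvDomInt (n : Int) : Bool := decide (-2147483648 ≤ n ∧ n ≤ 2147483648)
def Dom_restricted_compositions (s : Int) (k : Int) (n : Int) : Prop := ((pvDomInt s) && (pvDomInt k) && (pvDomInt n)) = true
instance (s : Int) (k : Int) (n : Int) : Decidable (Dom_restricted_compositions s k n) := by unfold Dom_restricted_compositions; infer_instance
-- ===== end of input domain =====

-- B replaces A's recursive generator with per-call rebuilt suffix-sum list by an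
-- iterative DFS over an explicit stack whose frames carry the running prefix sum
-- mod n and the set of prefix sums seen (same output, same order).

-- ===== PORT A =====
-- helper 'restrict' of A: rebuilds the running suffix-sum list for composition + [part]
def pvRestrict (n : Int) (r : List Int) (part : Int) (composition : List Int) : List Int :=
  if composition.length = 0 then []
  else r.map (fun summation => PySem.Int.mod (summation + part) n) ++
       [PySem.Int.mod (composition.getLastD 0 + part) n]

-- A's inner generator 'compute', materialized in yield order; fuel only makes the
-- recursion structural (A's recursion depth is bounded, see restricted_compositions).
def pvComputeA (n : Int) : Nat → Int → Int → List Int → List Int → List (List Int)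
  | 0, _, _, _, _ => []
  | fuel + 1, s, k, composition, r =>
    if k = 0 then
      (if s = 0 then [composition] else [])
    else if ¬ (0 ∈ r) then
      if k = 1 then
        (if 1 ≤ s ∧ s < n then [composition ++ [s]] else [])
      else if k ≤ s ∧ s ≤ (n - 1) * k then
        (PySem.List.pyRange 1 n 1).foldl
          (fun acc part =>
            acc ++ pvComputeA n fuel (s - part) (k - 1) (composition ++ [part])
                     (pvRestrict n r part composition)) []
      else []
    else []

-- fuel k.toNat + n.toNat + 9 exceeds A's recursion depth on every input (k decreases
-- by 1 per call; for k < 0 the recursion only continues when n = 2 and dies within 2 levels)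
def restricted_compositions (s : Int) (k : Int) (n : Int) : List (List Int) :=
  pvComputeA n (k.toNat + n.toNat + 9) s k [] []

-- ===== PORT B =====
-- a stack frame of Source B: (depth budget, rem, parts, comp, cur, seen); the Nat budget is
-- NOT in the Python — it is the totality device making the while-loop recursion well-founded
abbrev pvFrame := Nat × Int × Int × List Int × Int × PySem.Set Int

-- termination measure for the stack loop: sum of (c+1)^budget over the stack
def pvMu (c : Nat) (st : List pvFrame) : Nat := (st.map (fun f => (c + 1) ^ f.1)).sum

lemma pvMu_cons (c : Nat) (f : pvFrame) (st : List pvFrame) :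
    pvMu c (f :: st) = (c + 1) ^ f.1 + pvMu c st := by simp [pvMu]

-- cited by pvLoopB's decreasing_by: dropping the top frame shrinks the measure
lemma pvMu_lt_cons (c : Nat) (f : pvFrame) (st : List pvFrame) :
    pvMu c st < pvMu c (f :: st) := by
  rw [pvMu_cons]
  have : 0 < (c + 1) ^ f.1 := Nat.pow_pos (by omega)
  omega

-- cited by pvLoopB's decreasing_by: the pushed children weigh at most |L| * (c+1)^d'
lemma pvMu_foldr_le (c : Nat) (n cur s k : Int) (comp : List Int) (seen : PySem.Set Int)
    (d' : Nat) : ∀ (L : List Int) (rest : List pvFrame),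
    pvMu c (L.foldr
      (fun part acc =>
        if ¬ (PySem.Set.contains seen (PySem.Int.mod (cur + part) n) = true) then
          (d', s - part, k - 1, comp ++ [part], PySem.Int.mod (cur + part) n,
            PySem.Set.add seen (PySem.Int.mod (cur + part) n)) :: acc
        else acc) rest) ≤ L.length * (c + 1) ^ d' + pvMu c rest := by
  intro L
  induction L with
  | nil => intro rest; simp
  | cons p L ih =>
    intro rest
    simp only [List.foldr_cons, List.length_cons]
    have hb := ih rest
    have hmul : (L.length + 1) * (c + 1) ^ d' = (c + 1) ^ d' + L.length * (c + 1) ^ d' := by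
      ring
    split_ifs
    · omega
    · rw [pvMu_cons]
      dsimp only
      omega

-- Source B's while-loop: pop the top frame, handle it, push the surviving children of the
-- reversed part range (the foldr prepends them in increasing-part order, exactly as the
-- Python pushes them in reversed order), append emitted compositions to out
def pvLoopB (n : Int) (st : List pvFrame) (out : List (List Int)) : List (List Int) :=
  match st with
  | [] => out
  | (d, rem, parts, comp, cur, seen) :: rest =>
    if parts = 0 then
      pvLoopB n rest (if rem = 0 then out ++ [comp] else out)
    else if parts = 1 then
      pvLoopB n rest (if 1 ≤ rem ∧ rem < n then out ++ [comp ++ [rem]] else out)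
    else if parts ≤ rem ∧ rem ≤ (n - 1) * parts then
      match d with
      | 0 => pvLoopB n rest out   -- budget exhausted; unreachable from restricted_compositions_alt
      | d' + 1 =>
        pvLoopB n ((PySem.List.pyRange 1 n 1).foldr
          (fun part acc =>
            if ¬ (PySem.Set.contains seen (PySem.Int.mod (cur + part) n) = true) then
              (d', rem - part, parts - 1, comp ++ [part], PySem.Int.mod (cur + part) n,
                PySem.Set.add seen (PySem.Int.mod (cur + part) n)) :: acc
            else acc) rest) out
    else pvLoopB n rest out
termination_by pvMu (n - 1).toNat st
decreasing_by
  · exact pvMu_lt_cons _ _ _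
  · exact pvMu_lt_cons _ _ _
  · exact pvMu_lt_cons _ _ _
  · simp only [dite_eq_ite]
    rw [pvMu_cons]
    dsimp only
    simp only [Nat.succ_eq_add_one]
    have hle := pvMu_foldr_le ((n - 1).toNat) n cur rem parts comp seen d'
      (PySem.List.pyRange 1 n 1) rest
    rw [PySem.List.length_pyRange_one] at hle
    have hpow : 0 < ((n - 1).toNat + 1) ^ d' := Nat.pow_pos (by omega)
    have hmul : ((n - 1).toNat + 1) ^ (d' + 1) =
        ((n - 1).toNat + 1) * ((n - 1).toNat + 1) ^ d' := pow_succ' _ _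
    have hm : (n - 1).toNat * ((n - 1).toNat + 1) ^ d' <
        ((n - 1).toNat + 1) * ((n - 1).toNat + 1) ^ d' :=
      mul_lt_mul_of_pos_right (by omega) hpow
    omega
  · exact pvMu_lt_cons _ _ _

-- initial budget k.toNat + n.toNat + 8 exceeds the DFS depth on every input (see PORT A)
def restricted_compositions_alt (s : Int) (k : Int) (n : Int) : List (List Int) :=
  pvLoopB n [(k.toNat + n.toNat + 8, s, k, [], 0, PySem.Set.ofList [0])] []

-- ===== PRECONDITION & SPEC =====
def Spec_restricted_compositions (s : Int) (k : Int) (n : Int) (out : List (List Int)) : Prop := out = restricted_compositions_alt s k n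
instance (s : Int) (k : Int) (n : Int) (out : List (List Int)) : Decidable (Spec_restricted_compositions s k n out) := by unfold Spec_restricted_compositions; infer_instance

-- ===== CLAIM (what is proved, stated in full; the proofs are below) =====
def Claim_equal_restricted_compositions : Prop := ∀ (s : Int) (k : Int) (n : Int), Dom_restricted_compositions s k n → Spec_restricted_compositions s k n (restricted_compositions s k n)

-- ===== LEMMAS AND PROOFS =====

-- proof-side denotation of a single stack frame: the compositions it eventually emits
def pvSem (n : Int) (d : Nat) (rem parts : Int) (comp : List Int) (cur : Int)
    (seen : PySem.Set Int) : List (List Int) :=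
  if parts = 0 then (if rem = 0 then [comp] else [])
  else if parts = 1 then (if 1 ≤ rem ∧ rem < n then [comp ++ [rem]] else [])
  else if parts ≤ rem ∧ rem ≤ (n - 1) * parts then
    match d with
    | 0 => []
    | d' + 1 =>
      (PySem.List.pyRange 1 n 1).foldl
        (fun acc part =>
          if ¬ (PySem.Set.contains seen (PySem.Int.mod (cur + part) n) = true) then
            acc ++ pvSem n d' (rem - part) (parts - 1) (comp ++ [part])
                     (PySem.Int.mod (cur + part) n)
                     (PySem.Set.add seen (PySem.Int.mod (cur + part) n))
          else acc) []
  else []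
termination_by d
decreasing_by omega

-- the empty stack returns the accumulated output
lemma pvLoopB_nil (n : Int) (out : List (List Int)) : pvLoopB n [] out = out := by
  rw [pvLoopB.eq_def]

-- the stack loop processes its top frame to exactly that frame's denotation
lemma pvLoop_frame (n : Int) : ∀ (d : Nat) (rem parts : Int) (comp : List Int) (cur : Int)
    (seen : PySem.Set Int) (rest : List pvFrame) (out : List (List Int)),
    pvLoopB n ((d, rem, parts, comp, cur, seen) :: rest) out =
      pvLoopB n rest (out ++ pvSem n d rem parts comp cur seen) := by
  intro d
  induction d using Nat.strong_induction_on with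
  | _ d ih =>
    intro rem parts comp cur seen rest out
    rw [pvLoopB.eq_def, pvSem.eq_def]
    dsimp only
    by_cases h0 : parts = 0
    · rw [if_pos h0, if_pos h0]; split_ifs <;> simp
    rw [if_neg h0, if_neg h0]
    by_cases h1 : parts = 1
    · rw [if_pos h1, if_pos h1]; split_ifs <;> simp
    rw [if_neg h1, if_neg h1]
    by_cases hb : parts ≤ rem ∧ rem ≤ (n - 1) * parts
    swap
    · rw [if_neg hb, if_neg hb]; simp
    rw [if_pos hb, if_pos hb]
    match d with
    | 0 => simp
    | d' + 1 =>
      dsimp only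
      have ihd := ih d' (by omega)
      -- fold the pushed children off the stack one by one
      have key : ∀ (L : List Int) (rest : List pvFrame) (out : List (List Int)),
          pvLoopB n
            (L.foldr (fun part acc =>
              if ¬ (PySem.Set.contains seen (PySem.Int.mod (cur + part) n) = true) then
                (d', rem - part, parts - 1, comp ++ [part], PySem.Int.mod (cur + part) n,
                  PySem.Set.add seen (PySem.Int.mod (cur + part) n)) :: acc
              else acc) rest) out =
          pvLoopB n rest
            (L.foldl (fun acc part =>
              if ¬ (PySem.Set.contains seen (PySem.Int.mod (cur + part) n) = true) then
                acc ++ pvSem n d' (rem - part) (parts - 1) (comp ++ [part])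
                         (PySem.Int.mod (cur + part) n)
                         (PySem.Set.add seen (PySem.Int.mod (cur + part) n))
              else acc) out) := by
        intro L
        induction L with
        | nil => intro rest out; simp
        | cons p L ihL =>
          intro rest out
          simp only [List.foldr_cons, List.foldl_cons]
          by_cases hp : ¬ (PySem.Set.contains seen (PySem.Int.mod (cur + p) n) = true)
          · rw [if_pos hp, if_pos hp, ihd, ihL]
          · rw [if_neg hp, if_neg hp, ihL]
      rw [key]
      congr 1
      -- pull the 'out' accumulator in front of the inner fold
      have hsplit := PySem.List.foldl_append_eq_flatMap
        (g := fun part =>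
          if ¬ (PySem.Set.contains seen (PySem.Int.mod (cur + part) n) = true) then
            pvSem n d' (rem - part) (parts - 1) (comp ++ [part])
              (PySem.Int.mod (cur + part) n)
              (PySem.Set.add seen (PySem.Int.mod (cur + part) n))
          else [])
        (l := PySem.List.pyRange 1 n 1)
      have heq : ∀ (init : List (List Int)),
          (PySem.List.pyRange 1 n 1).foldl (fun acc part =>
            if ¬ (PySem.Set.contains seen (PySem.Int.mod (cur + part) n) = true) then
              acc ++ pvSem n d' (rem - part) (parts - 1) (comp ++ [part])
                       (PySem.Int.mod (cur + part) n)
                       (PySem.Set.add seen (PySem.Int.mod (cur + part) n))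
            else acc) init =
          (PySem.List.pyRange 1 n 1).foldl (fun acc part =>
            acc ++ (if ¬ (PySem.Set.contains seen (PySem.Int.mod (cur + part) n) = true) then
              pvSem n d' (rem - part) (parts - 1) (comp ++ [part])
                (PySem.Int.mod (cur + part) n)
                (PySem.Set.add seen (PySem.Int.mod (cur + part) n))
            else [])) init := by
        intro init
        apply PySem.List.foldl_congr_mem'
        intro x _ acc
        split_ifs <;> simp
      rw [heq, heq, hsplit (acc := out), hsplit (acc := []), List.nil_append]

-- mod-rewriting helper: for positive n, Python's mod is emod
lemma pvMod_add (n : Int) (hn : 0 < n) (a b : Int) :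
    PySem.Int.mod (PySem.Int.mod a n + b) n = PySem.Int.mod (a + b) n := by
  rw [PySem.Int.mod_eq_emod_of_pos hn, PySem.Int.mod_eq_emod_of_pos hn,
      PySem.Int.mod_eq_emod_of_pos hn, Int.emod_add_emod]

-- n does not divide a part in [1, n)
lemma pvNotDvd (n part : Int) (h1 : 1 ≤ part) (h2 : part < n) : ¬ n ∣ part := by
  intro h
  have := Int.le_of_dvd (by omega) h
  omega

-- the last element of a nonempty list is its sum minus the sum of the preceding prefix
lemma pvLast_sum : ∀ (c : List Int) (d : Int), c ≠ [] →
    (c.take (c.length - 1)).sum + c.getLastD d = c.sum := by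
  intro c
  induction c with
  | nil => intro d h; exact absurd rfl h
  | cons a t ih =>
    intro d _
    cases t with
    | nil => simp
    | cons b u =>
      have h2 := ih a (by simp)
      simp only [List.getLastD_cons] at h2 ⊢
      simp only [List.length_cons, Nat.add_sub_cancel, List.take_succ_cons, List.sum_cons] at h2 ⊢
      omega

-- membership in A's rebuilt suffix-sum list, stated for the extended composition c ++ [part]
lemma pvRestrict_mem (n : Int) (hn : 2 ≤ n) (r c : List Int) (part : Int)
    (hr : ∀ x, x ∈ r ↔ ∃ j : Nat, j + 2 ≤ c.length ∧
            x = PySem.Int.mod (c.sum - (c.take j).sum) n) :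
    ∀ x, x ∈ pvRestrict n r part c ↔ ∃ j : Nat, j + 2 ≤ (c ++ [part]).length ∧
            x = PySem.Int.mod ((c ++ [part]).sum - ((c ++ [part]).take j).sum) n := by
  intro x
  simp only [List.length_append, List.sum_append, List.sum_cons, List.sum_nil, add_zero,
             List.length_cons, List.length_nil, Nat.zero_add]
  unfold pvRestrict
  by_cases hc0 : c.length = 0
  · have hcnil : c = [] := List.eq_nil_of_length_eq_zero hc0
    subst hcnil
    simp only [hc0]
    constructor
    · intro h; simp at h
    · rintro ⟨j, hj, _⟩; simp at hj
  · rw [if_neg hc0]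
    have hcnil : c ≠ [] := by intro h; subst h; simp at hc0
    have hlen1 : 1 ≤ c.length := Nat.one_le_iff_ne_zero.mpr hc0
    constructor
    · intro hx
      rcases List.mem_append.mp hx with hx | hx
      · rcases List.mem_map.mp hx with ⟨y, hyr, hxy⟩
        rcases (hr y).mp hyr with ⟨j, hj, hy⟩
        refine ⟨j, by omega, ?_⟩
        rw [List.take_append_of_le_length (by omega)]
        rw [← hxy, hy, pvMod_add n (by omega)]
        ring_nf
      · have hxl : x = PySem.Int.mod (c.getLastD 0 + part) n := by simpa using hx
        have hlast := pvLast_sum c 0 hcnil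
        refine ⟨c.length - 1, by omega, ?_⟩
        rw [List.take_append_of_le_length (by omega)]
        rw [hxl]
        congr 1
        omega
    · rintro ⟨j, hj, hx⟩
      rw [List.take_append_of_le_length (by omega)] at hx
      apply List.mem_append.mpr
      by_cases hjs : j + 2 ≤ c.length
      · left
        apply List.mem_map.mpr
        refine ⟨PySem.Int.mod (c.sum - (c.take j).sum) n, (hr _).mpr ⟨j, hjs, rfl⟩, ?_⟩
        rw [pvMod_add n (by omega)]
        rw [hx]; congr 1; ring
      · right
        have hjeq : j = c.length - 1 := by omega
        have hlast := pvLast_sum c 0 hcnil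
        subst hjeq
        simp only [List.mem_singleton]
        rw [hx]; congr 1; omega

-- one-step unfolding of A's recursion (cited so only the OUTER call unfolds)
lemma pvComputeA_succ (n : Int) (fuel : Nat) (s k : Int) (composition r : List Int) :
    pvComputeA n (fuel + 1) s k composition r =
      (if k = 0 then
        (if s = 0 then [composition] else [])
      else if ¬ (0 ∈ r) then
        if k = 1 then
          (if 1 ≤ s ∧ s < n then [composition ++ [s]] else [])
        else if k ≤ s ∧ s ≤ (n - 1) * k then
          (PySem.List.pyRange 1 n 1).foldl
            (fun acc part =>
              acc ++ pvComputeA n fuel (s - part) (k - 1) (composition ++ [part])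
                       (pvRestrict n r part composition)) []
        else []
      else []) := rfl

-- the central simulation: under the invariant linking r to (cur, seen), A's recursion
-- at fuel d+1 computes exactly the frame denotation at budget d
lemma pvAB (n : Int) (hn : 2 ≤ n) :
    ∀ (d : Nat) (s k : Int) (c r : List Int) (cur : Int) (seen : PySem.Set Int),
      cur = PySem.Int.mod c.sum n →
      (∀ x, x ∈ r ↔ ∃ j : Nat, j + 2 ≤ c.length ∧
          x = PySem.Int.mod (c.sum - (c.take j).sum) n) →
      (∀ x, x ∈ seen ↔ ∃ j : Nat, j ≤ c.length ∧
          x = PySem.Int.mod ((c.take j).sum) n) →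
      ¬ (0 ∈ r) →
      pvComputeA n (d + 1) s k c r = pvSem n d s k c cur seen := by
  intro d
  induction d with
  | zero =>
    intro s k c r cur seen hcur hr hs hr0
    rw [pvSem, pvComputeA_succ]
    by_cases hk0 : k = 0
    · rw [if_pos hk0, if_pos hk0]
    rw [if_neg hk0, if_neg hk0, if_pos hr0]
    by_cases hk1 : k = 1
    · rw [if_pos hk1, if_pos hk1]
    rw [if_neg hk1, if_neg hk1]
    by_cases hb : k ≤ s ∧ s ≤ (n - 1) * k
    swap
    · rw [if_neg hb, if_neg hb]
    rw [if_pos hb, if_pos hb]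
    -- every child call runs out of fuel on the A side; the denotation is [] at budget 0
    have hfun : (fun (acc : List (List Int)) (part : Int) =>
        acc ++ pvComputeA n 0 (s - part) (k - 1) (c ++ [part]) (pvRestrict n r part c)) =
        fun acc _ => acc := by
      funext a p
      simp [pvComputeA]
    rw [hfun, PySem.List.foldl_ignore]
  | succ d' ih =>
    intro s k c r cur seen hcur hr hs hr0
    rw [pvSem, pvComputeA_succ]
    by_cases hk0 : k = 0
    · rw [if_pos hk0, if_pos hk0]
    rw [if_neg hk0, if_neg hk0, if_pos hr0]
    by_cases hk1 : k = 1
    · rw [if_pos hk1, if_pos hk1]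
    rw [if_neg hk1, if_neg hk1]
    by_cases hb : k ≤ s ∧ s ≤ (n - 1) * k
    swap
    · rw [if_neg hb, if_neg hb]
    rw [if_pos hb, if_pos hb]
    apply PySem.List.foldl_congr_mem'
    intro part hpart acc
    have hp : 1 ≤ part ∧ part < n := (PySem.List.mem_pyRange_one).mp hpart
    -- shared facts about the extended composition
    have hnp : PySem.Int.mod (cur + part) n = PySem.Int.mod (c.sum + part) n := by
      rw [hcur, pvMod_add n (by omega)]
    have hr' := pvRestrict_mem n hn r c part hr
    -- key: the new prefix sum was already seen  ↔  0 is in A's rebuilt suffix list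
    have hkey : (PySem.Int.mod (cur + part) n ∈ seen) ↔ (0 ∈ pvRestrict n r part c) := by
      rw [hnp]
      constructor
      · intro hmem
        rcases (hs _).mp hmem with ⟨j, hj, hv⟩
        by_cases hjlt : j + 1 ≤ c.length
        · apply (hr' 0).mpr
          refine ⟨j, by simp; omega, ?_⟩
          rw [List.take_append_of_le_length (by omega)]
          simp only [List.sum_append, List.sum_cons, List.sum_nil, add_zero]
          rw [PySem.Int.mod_eq_emod_of_pos (by omega)] at hv ⊢
          rw [PySem.Int.mod_eq_emod_of_pos (by omega)] at hv
          have := (Int.emod_eq_emod_iff_emod_sub_eq_zero).mp hv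
          omega
        · -- j = c.length: would force n ∣ part, impossible
          exfalso
          have hjeq : j = c.length := by omega
          subst hjeq
          rw [List.take_length] at hv
          rw [PySem.Int.mod_eq_emod_of_pos (by omega), PySem.Int.mod_eq_emod_of_pos (by omega)] at hv
          have h0 := (Int.emod_eq_emod_iff_emod_sub_eq_zero).mp hv
          have : (c.sum + part - c.sum) % n = 0 := h0
          have hdvd : n ∣ part := by
            have : part % n = 0 := by rw [← this]; congr 1; ring
            exact Int.dvd_of_emod_eq_zero this
          exact pvNotDvd n part hp.1 hp.2 hdvd
      · intro hmem
        rcases (hr' 0).mp hmem with ⟨j, hj, hv⟩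
        simp only [List.length_append, List.length_cons, List.length_nil] at hj
        rw [List.take_append_of_le_length (by omega)] at hv
        simp only [List.sum_append, List.sum_cons, List.sum_nil, add_zero] at hv
        apply (hs _).mpr
        refine ⟨j, by omega, ?_⟩
        rw [PySem.Int.mod_eq_emod_of_pos (by omega)] at hv ⊢
        rw [PySem.Int.mod_eq_emod_of_pos (by omega)]
        have := (Int.emod_eq_emod_iff_emod_sub_eq_zero).mpr
          (by omega : (c.sum + part - (c.take j).sum) % n = 0)
        omega
    by_cases hcont : PySem.Set.contains seen (PySem.Int.mod (cur + part) n) = true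
    · -- pruned by B; A's child hits 0 ∈ r' and yields nothing
      rw [if_neg (not_not_intro hcont)]
      have h0r' : 0 ∈ pvRestrict n r part c := hkey.mp ((PySem.Set.contains_iff seen _).mp hcont)
      have hAnil : pvComputeA n (d' + 1) (s - part) (k - 1) (c ++ [part]) (pvRestrict n r part c) = [] := by
        rw [pvComputeA_succ]
        rw [if_neg (by omega : ¬ (k - 1 = 0)), if_neg (by simp [h0r'])]
      rw [hAnil, List.append_nil]
    · -- not seen: recurse on both sides with the extended invariant
      rw [if_pos hcont]
      congr 1
      apply ih (s - part) (k - 1) (c ++ [part]) _ _ _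
      · -- cur' = mod of extended sum
        rw [hnp]
        simp [List.sum_append]
      · exact hr'
      · -- seen' characterization
        intro x
        rw [PySem.Set.mem_add]
        constructor
        · rintro (hx | hx)
          · rcases (hs x).mp hx with ⟨j, hj, hv⟩
            refine ⟨j, by simp; omega, ?_⟩
            rw [List.take_append_of_le_length (by omega)]
            exact hv
          · refine ⟨(c ++ [part]).length, le_refl _, ?_⟩
            rw [List.take_length]
            simp only [List.sum_append, List.sum_cons, List.sum_nil, add_zero]
            rw [hx, hnp]
        · rintro ⟨j, hj, hv⟩
          simp only [List.length_append, List.length_cons, List.length_nil] at hj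
          by_cases hjle : j ≤ c.length
          · left
            apply (hs x).mpr
            refine ⟨j, hjle, ?_⟩
            rw [List.take_append_of_le_length hjle] at hv
            exact hv
          · right
            have : j = c.length + 1 := by omega
            subst this
            have : (c ++ [part]).take (c.length + 1) = c ++ [part] := by
              apply List.take_of_length_le
              simp
            rw [this] at hv
            simp only [List.sum_append, List.sum_cons, List.sum_nil, add_zero] at hv
            rw [hv, hnp]
      · -- 0 not in the rebuilt r'
        intro h0
        exact hcont ((PySem.Set.contains_iff seen _).mpr (hkey.mpr h0))

theorem pv_main (s k n : Int) :
    restricted_compositions s k n = restricted_compositions_alt s k n := by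
  unfold restricted_compositions restricted_compositions_alt
  rw [pvLoop_frame, pvLoopB_nil, List.nil_append]
  by_cases hn : 2 ≤ n
  · apply pvAB n hn
    · -- cur = mod 0 n = 0
      rw [PySem.Int.mod_eq_emod_of_pos (by omega)]
      simp
    · intro x
      simp only [List.not_mem_nil, List.length_nil, false_iff]
      rintro ⟨j, hj, _⟩
      omega
    · intro x
      constructor
      · intro hx
        have : x = 0 := by simpa [PySem.Set.mem_ofList] using hx
        exact ⟨0, by simp, by simp [this, PySem.Int.mod]⟩
      · rintro ⟨j, hj, hv⟩
        simp only [List.length_nil, Nat.le_zero] at hj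
        subst hj
        simp only [List.take_nil, List.sum_nil] at hv
        rw [PySem.Int.mod_eq_emod_of_pos (by omega)] at hv
        simp [PySem.Set.mem_ofList, hv]
      -- the remaining goal: ¬ 0 ∈ []
    · simp
  · -- n ≤ 1 (or n ≤ 1 < 2): allowed is empty, both sides compute identically
    obtain ⟨m, hm⟩ : ∃ m, k.toNat + n.toNat + 8 = m + 1 := ⟨k.toNat + n.toNat + 7, by omega⟩
    rw [hm]
    have hpr : PySem.List.pyRange 1 n 1 = [] := PySem.List.pyRange_one_eq_nil (by omega)
    rw [pvSem, pvComputeA_succ]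
    simp [hpr]

-- ===== VERDICT (by name: the statement is the Claim_ definition above) =====
theorem restricted_compositions_spec : Claim_equal_restricted_compositions := by
  intro s k n _
  unfold Spec_restricted_compositions
  exact pv_main s k n
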